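-- pv_equiv track=rewrite | github.com/thesethtruth/atlite-profiles-api | service/cli.py | _with_vertical_y_label
-- ===== SOURCE A (Python) =====
-- def _with_vertical_y_label(rendered_plot: str, label: str) -> str:
--     lines = rendered_plot.splitlines()
--     if not lines or not label:
--         return rendered_plot
--
--     prefixes = [" "] * len(lines)
--     start = max(0, (len(lines) - len(label)) // 2)
--     for idx, char in enumerate(label):
--         target = start + idx
--         if target >= len(prefixes):
--             break
--         prefixes[target] = char
--
--     return "\n".join(
--         f"{prefixes[line_idx]} {line}" for line_idx, line in enumerate(lines)
--     )
-- ===== SOURCE B (Python) =====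
-- def _with_vertical_y_label(rendered_plot: str, label: str) -> str:
--     lines = rendered_plot.splitlines()
--     if not lines or not label:
--         return rendered_plot
--     start = max(0, (len(lines) - len(label)) // 2)
--     stop = start + len(label)
--     top = ["  " + line for line in lines[:start]]
--     mid = [c + " " + line for c, line in zip(label, lines[start:stop])]
--     bot = ["  " + line for line in lines[stop:]]
--     return "\n".join(top + mid + bot)
-- ===== Notes on version B (the rewrite author's own statement) =====
-- stated objective: alternative
-- what changed: Replaces A's mutable prefix array built by an indexed placement loop (with break) and a single enumerate pass with a slice-based decomposition: the lines are split into top/middle/bottom segments, the middle is zipped with the label (zip's truncation reproduces the silent drop of extra label chars), and the three mapped segments are concatenated; no per-line index arithmetic or gutter table remains.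
import Mathlib
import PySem

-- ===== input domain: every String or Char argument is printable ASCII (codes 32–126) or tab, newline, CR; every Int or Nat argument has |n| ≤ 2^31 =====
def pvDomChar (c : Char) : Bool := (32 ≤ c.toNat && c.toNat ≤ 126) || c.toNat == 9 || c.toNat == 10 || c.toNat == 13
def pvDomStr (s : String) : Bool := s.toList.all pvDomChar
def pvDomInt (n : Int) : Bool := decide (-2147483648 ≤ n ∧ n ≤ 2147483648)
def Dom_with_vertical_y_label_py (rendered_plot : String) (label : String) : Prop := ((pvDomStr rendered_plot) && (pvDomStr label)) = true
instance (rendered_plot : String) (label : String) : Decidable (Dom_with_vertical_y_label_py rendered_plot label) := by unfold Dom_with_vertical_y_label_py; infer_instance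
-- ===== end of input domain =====

-- B replaces A's mutable prefix array (built by an indexed placement loop with break)
-- with a slice-based decomposition: top/middle/bottom segments, the middle zipped with
-- the label; objective: alternative (same cost, different structure).


-- ===== PORT A =====
-- the 'for idx, char in enumerate(label): target = start + idx; if target >= len(prefixes): break; prefixes[target] = char' loop
def pvSetLoopA : List Char → Int → List Char → List Char
  | prefixes, _, [] => prefixes
  | prefixes, target, c :: rest =>
    if (prefixes.length : Int) ≤ target then prefixes
    else pvSetLoopA (PySem.List.pySetD prefixes target c) (target + 1) rest

def with_vertical_y_label_py (rendered_plot : String) (label : String) : String :=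
  let lines := PySem.Str.splitlines rendered_plot
  if lines = [] ∨ label.toList = [] then rendered_plot
  else
    let start := max 0 (PySem.Int.floordiv ((lines.length : Int) - (label.toList.length : Int)) 2)
    let prefixes := pvSetLoopA (List.replicate lines.length ' ') start label.toList
    PySem.Str.join "\n"
      ((PySem.List.enumerate lines).map (fun il =>
        String.ofList (PySem.List.pyGetD prefixes il.1 ' ' :: ' ' :: il.2.toList)))

-- ===== PORT B =====
def with_vertical_y_label_py_alt (rendered_plot : String) (label : String) : String :=
  let lines := PySem.Str.splitlines rendered_plot
  if lines = [] ∨ label.toList = [] then rendered_plot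
  else
    let lab := label.toList
    let start := max 0 (PySem.Int.floordiv ((lines.length : Int) - (lab.length : Int)) 2)
    let stop := start + (lab.length : Int)
    let top := (PySem.List.slice lines none (some start)).map
      (fun line => String.ofList (' ' :: ' ' :: line.toList))
    let mid := (lab.zip (PySem.List.slice lines (some start) (some stop))).map
      (fun cl => String.ofList (cl.1 :: ' ' :: cl.2.toList))
    let bot := (PySem.List.slice lines (some stop) none).map
      (fun line => String.ofList (' ' :: ' ' :: line.toList))
    PySem.Str.join "\n" (top ++ mid ++ bot)

-- ===== PRECONDITION & SPEC =====
def Spec_with_vertical_y_label_py (rendered_plot : String) (label : String) (out : String) : Prop := out = with_vertical_y_label_py_alt rendered_plot label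
instance (rendered_plot : String) (label : String) (out : String) : Decidable (Spec_with_vertical_y_label_py rendered_plot label out) := by unfold Spec_with_vertical_y_label_py; infer_instance

-- ===== CLAIM (what is proved, stated in full; the proofs are below) =====
def Claim_equal_with_vertical_y_label_py : Prop := ∀ (rendered_plot : String) (label : String), Dom_with_vertical_y_label_py rendered_plot label → Spec_with_vertical_y_label_py rendered_plot label (with_vertical_y_label_py rendered_plot label)

-- ===== LEMMAS AND PROOFS =====

-- the final prefix array, read at index k, is the reverse lookup into the label
lemma pvSetLoopA_getD (cs : List Char) (prefixes : List Char) (m k : Nat)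
    (hk : k < prefixes.length) :
    (pvSetLoopA prefixes (m : Int) cs).getD k ' ' =
      if m ≤ k ∧ k < m + cs.length then cs.getD (k - m) ' ' else prefixes.getD k ' ' := by
  induction cs generalizing prefixes m with
  | nil =>
    rw [pvSetLoopA, if_neg (by simp only [List.length_nil]; omega)]
  | cons c rest ih =>
    rw [pvSetLoopA]
    by_cases hm : (prefixes.length : Int) ≤ (m : Int)
    · rw [if_pos hm]
      have hmlen : prefixes.length ≤ m := by exact_mod_cast hm
      rw [if_neg (by simp only [List.length_cons]; omega)]
    · rw [if_neg hm]
      simp only [Int.not_le] at hm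
      have hmlen : m < prefixes.length := by exact_mod_cast hm
      have hcast : (m : Int) + 1 = ((m + 1 : Nat) : Int) := by push_cast; ring
      rw [PySem.List.pySetD_natCast, hcast,
        ih (prefixes.set m c) (m + 1) (by simpa using hk)]
      rcases Nat.lt_trichotomy k m with hlt | heq | hgt
      · rw [if_neg (by omega), if_neg (by simp only [List.length_cons]; omega),
          List.getD_eq_getElem?_getD, List.getD_eq_getElem?_getD,
          List.getElem?_set_ne (by omega)]
      · obtain rfl := heq
        rw [if_neg (by omega), if_pos (by simp only [List.length_cons]; omega)]
        simp [List.getD_eq_getElem?_getD, List.getElem?_set_self hmlen]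
      · by_cases hr : k < m + 1 + rest.length
        · rw [if_pos (by omega), if_pos (by simp only [List.length_cons]; omega)]
          have hkm : k - m = (k - (m + 1)) + 1 := by omega
          rw [hkm, List.getD_cons_succ]
        · rw [if_neg (by omega), if_neg (by simp only [List.length_cons]; omega),
            List.getD_eq_getElem?_getD, List.getD_eq_getElem?_getD,
            List.getElem?_set_ne (by omega)]

-- the enumerate pass with a reverse-mapped gutter char equals the three mapped segments
lemma pv_segments {α β : Type} (g : Char → α → β) (lines : List α) (lab : List Char)
    (m : Nat) (hm : m ≤ lines.length) :
    (PySem.List.enumerate lines).map (fun il =>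
        g (if (m : Int) ≤ il.1 ∧ il.1 < (m : Int) + (lab.length : Int)
            then PySem.List.pyGetD lab (il.1 - (m : Int)) ' ' else ' ') il.2)
      = (lines.take m).map (g ' ')
        ++ (lab.zip ((lines.drop m).take lab.length)).map (fun cl => g cl.1 cl.2)
        ++ (lines.drop (m + lab.length)).map (g ' ') := by
  apply List.ext_getElem
  · simp only [List.length_map, PySem.List.length_enumerate, List.length_append,
      List.length_zip, List.length_take, List.length_drop]
    omega
  · intro k h1 h2
    simp only [List.length_map, PySem.List.length_enumerate] at h1
    simp only [List.getElem_map, PySem.List.getElem_enumerate, zero_add]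
    by_cases hk1 : k < m
    · rw [if_neg (by omega),
        List.getElem_append_left (by
          simp only [List.length_append, List.length_map, List.length_take, List.length_zip,
            List.length_drop]; omega),
        List.getElem_append_left (by
          simp only [List.length_map, List.length_take]; omega)]
      simp only [List.getElem_map, List.getElem_take]
    · by_cases hk2 : k < m + min lab.length (lines.length - m)
      · rw [if_pos (by constructor <;> omega),
          List.getElem_append_left (by
            simp only [List.length_append, List.length_map, List.length_take, List.length_zip,
              List.length_drop]; omega),
          List.getElem_append_right (by
            simp only [List.length_map, List.length_take]; omega)]
        simp only [List.getElem_map, List.length_map, List.length_take, List.getElem_zip,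
          List.getElem_take, List.getElem_drop]
        have hidx : k - min m lines.length = k - m := by omega
        rw [show ((k : Int) - (m : Int)) = ((k - m : Nat) : Int) by omega,
          PySem.List.pyGetD_natCast, List.getD_eq_getElem?_getD,
          List.getElem?_eq_getElem (by omega : k - m < lab.length)]
        simp only [Option.getD_some]
        congr 1
        · exact getElem_congr rfl hidx.symm (by omega)
        · exact getElem_congr rfl (by omega : k = m + (k - min m lines.length)) (by omega)
      · rw [if_neg (by omega),
          List.getElem_append_right (by
            simp only [List.length_append, List.length_map, List.length_take, List.length_zip,
              List.length_drop]; omega)]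
        simp only [List.getElem_map, List.length_append, List.length_map, List.length_take,
          List.length_zip, List.length_drop, List.getElem_drop]
        congr 1
        exact getElem_congr rfl (by omega) (by omega)

-- ===== VERDICT (by name: the statement is the Claim_ definition above) =====
theorem with_vertical_y_label_py_spec : Claim_equal_with_vertical_y_label_py := by
  intro rendered_plot label _
  unfold Spec_with_vertical_y_label_py
  by_cases hg : PySem.Str.splitlines rendered_plot = [] ∨ label.toList = []
  · simp only [with_vertical_y_label_py, with_vertical_y_label_py_alt, if_pos hg]
  · simp only [with_vertical_y_label_py, with_vertical_y_label_py_alt, if_neg hg]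
    rw [not_or] at hg
    set lines := PySem.Str.splitlines rendered_plot with hlines
    set lab := label.toList with hlab
    set start := max 0 (PySem.Int.floordiv ((lines.length : Int) - (lab.length : Int)) 2)
      with hstart
    obtain ⟨m, hm⟩ : ∃ m : Nat, (m : Int) = start :=
      ⟨start.toNat, Int.toNat_of_nonneg (le_max_left _ _)⟩
    have hmle : m ≤ lines.length := by
      have hfd : PySem.Int.floordiv ((lines.length : Int) - (lab.length : Int)) 2
          = ((lines.length : Int) - (lab.length : Int)) / 2 :=
        PySem.Int.floordiv_eq_ediv_of_pos (by omega)
      have hlen : 1 ≤ lines.length := List.length_pos_of_ne_nil hg.1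
      have : (m : Int) ≤ (lines.length : Int) := by
        rw [hm, hstart, hfd]
        apply max_le (by exact_mod_cast Nat.zero_le _)
        omega
      exact_mod_cast this
    have hA : (PySem.List.enumerate lines).map (fun il =>
        String.ofList (PySem.List.pyGetD
          (pvSetLoopA (List.replicate lines.length ' ') start lab) il.1 ' ' :: ' ' :: il.2.toList))
        = (PySem.List.enumerate lines).map (fun il =>
        String.ofList ((if (m : Int) ≤ il.1 ∧ il.1 < (m : Int) + (lab.length : Int)
            then PySem.List.pyGetD lab (il.1 - (m : Int)) ' ' else ' ') :: ' ' :: il.2.toList)) := by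
      apply List.map_congr_left
      intro il hmem
      rw [PySem.List.mem_enumerate_iff] at hmem
      obtain ⟨k, hk, rfl⟩ := hmem
      simp only [zero_add]
      congr 1
      rw [← hm, PySem.List.pyGetD_natCast,
        pvSetLoopA_getD lab _ m k (by simpa using hk)]
      by_cases hc : m ≤ k ∧ k < m + lab.length
      · rw [if_pos hc, if_pos (by constructor <;> [exact_mod_cast hc.1; omega]),
          show ((k : Nat) : Int) - ((m : Nat) : Int) = ((k - m : Nat) : Int) by omega,
          PySem.List.pyGetD_natCast]
      · rw [if_neg hc, if_neg (by omega), List.getD_eq_getElem?_getD, List.getElem?_replicate]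
        split <;> rfl
    rw [hA, pv_segments (fun c l => String.ofList (c :: ' ' :: l.toList)) lines lab m hmle,
      ← hm, PySem.List.slice_to_natCast,
      show (m : Int) + (lab.length : Int) = ((m : Nat) : Int) + ((lab.length : Nat) : Int) from rfl,
      PySem.List.slice_natCast_add,
      show ((m : Nat) : Int) + ((lab.length : Nat) : Int) = ((m + lab.length : Nat) : Int) by push_cast; ring,
      PySem.List.slice_from_natCast]
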